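-- pv_equiv track=rewrite | github.com/mhkndgn/logcollector | tools/logc_executor.py | hex_to_bits
-- ===== SOURCE A (Python) =====
-- def hex_to_bits(hex_data):
--     my_hexdata = hex_data
--     scale = 16
--     num_of_bits = 8
--     index_arr = bin(int(my_hexdata, scale))[2:].zfill(num_of_bits)[::-1]
--     cores = ""
--     for i in range(len(index_arr)):
--         if index_arr[i] == "1":
--             cores += str(i) + ","
--     cores = cores[:-1]
--     return cores
-- ===== SOURCE B (Python) =====
-- def hex_to_bits(hex_data):
--     n = int(hex_data, 16)
--     positions = []
--     while n:
--         lsb = n & -n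
--         positions.append(lsb.bit_length() - 1)
--         n &= n - 1
--     return ",".join(str(p) for p in positions)
-- ===== Notes on version B (the rewrite author's own statement) =====
-- stated objective: alternative
-- what changed: B parses the hex value once and extracts set-bit positions arithmetically with the lowest-set-bit trick (n & -n, bit_length, n &= n-1) and a single join, instead of formatting a binary string, zero-filling, reversing and scanning its characters with string concatenation.
-- outside the precondition, e.g. on hex_to_bits('-5'): A returns '0,2', B does not finish within the time limit
import Mathlib
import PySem

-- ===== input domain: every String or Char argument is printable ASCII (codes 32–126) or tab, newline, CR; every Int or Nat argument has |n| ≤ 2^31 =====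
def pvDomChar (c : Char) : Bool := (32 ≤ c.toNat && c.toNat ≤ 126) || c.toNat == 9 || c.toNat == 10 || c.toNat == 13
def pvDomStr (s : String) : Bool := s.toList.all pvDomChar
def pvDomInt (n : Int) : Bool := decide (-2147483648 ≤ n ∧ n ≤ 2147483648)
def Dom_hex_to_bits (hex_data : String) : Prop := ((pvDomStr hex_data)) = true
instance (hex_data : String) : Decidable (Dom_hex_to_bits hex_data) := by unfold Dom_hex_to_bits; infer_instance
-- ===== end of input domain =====

-- B replaces A's binary-string build/zfill/reverse/char-scan by arithmetic extraction of the set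
-- bits (n & -n, bit_length, n &= n-1) joined once; same results on Pre_ (valid, nonnegative hex).

-- ===== PORT A =====
def hex_to_bits (hex_data : String) : String :=
  match PySem.Int.ofStrBase? hex_data 16 with
  | none => ""      -- int(hex_data, 16) raises ValueError here; excluded by Pre_
  | some n =>
      -- bin(n)[2:].zfill(8)[::-1]  (slice? with step -1 is always some; getD never takes its default)
      let index_arr : List Char :=
        (PySem.Chars.slice? (PySem.Chars.zfill
          (PySem.Chars.slice (PySem.Int.toBinChars0b n) (some 2) none) 8) none none (-1)).getD []
      let cores : List Char :=
        (PySem.List.pyRange 0 (PySem.Chars.len index_arr) 1).foldl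
          (fun cores i =>
            if PySem.Chars.pyGet? index_arr i = some '1'
            then cores ++ (PySem.Int.toChars i ++ [',']) else cores) []
      String.ofList (PySem.Chars.slice cores none (some (-1)))

-- ===== PORT B =====
-- termination fact for the clear-lowest-bit loop (cited by hexBitsLoop's decreasing_by)
theorem band_pred_toNat_lt (n : Int) (h : 0 < n) :
    (PySem.Int.band n (n - 1)).toNat < n.toNat := by
  obtain ⟨m, rfl, hm⟩ : ∃ m : Nat, n = (m : Int) ∧ 0 < m :=
    ⟨n.toNat, by omega, by omega⟩
  have h1 : ((m : Int)) - 1 = ((m - 1 : Nat) : Int) := by omega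
  rw [h1, PySem.Int.band_natCast]
  have := Nat.and_le_right (n := m) (m := m - 1)
  simp only [Int.toNat_natCast]
  omega

-- while n: lsb = n & -n; positions.append(lsb.bit_length() - 1); n &= n - 1
-- (the Python loop is only entered with n > 0 under Pre_; the 0 < n guard just makes it total)
def hexBitsLoop (n : Int) : List Int :=
  if h : 0 < n then
    ((PySem.Int.bitLength (PySem.Int.band n (-n)) : Int) - 1) ::
      hexBitsLoop (PySem.Int.band n (n - 1))
  else []
termination_by n.toNat
decreasing_by exact band_pred_toNat_lt n h

def hex_to_bits_alt (hex_data : String) : String :=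
  match PySem.Int.ofStrBase? hex_data 16 with
  | none => ""      -- int(hex_data, 16) raises ValueError here; excluded by Pre_
  | some n =>
      String.ofList (PySem.Chars.join [','] ((hexBitsLoop n).map PySem.Int.toChars))

-- ===== PRECONDITION & SPEC =====
-- Pre_ excludes strings int(s,16) rejects (A raises ValueError) and strings denoting a negative
-- value, where A's output comes from scanning the reversed "-0b…" text (an artefact of the string
-- pipeline) and B's clear-lowest-bit loop does not terminate.
def Pre_hex_to_bits (hex_data : String) : Prop :=
  0 ≤ (PySem.Int.ofStrBase? hex_data 16).getD (-1)
instance (hex_data : String) : Decidable (Pre_hex_to_bits hex_data) := by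
  unfold Pre_hex_to_bits; infer_instance

def pvWitness_hex_to_bits : String := "1f"

def Spec_hex_to_bits (hex_data : String) (out : String) : Prop := out = hex_to_bits_alt hex_data
instance (hex_data : String) (out : String) : Decidable (Spec_hex_to_bits hex_data out) := by
  unfold Spec_hex_to_bits; infer_instance

-- ===== CLAIM (what is proved, stated in full; the proofs are below) =====
def Claim_equal_hex_to_bits : Prop := ∀ (hex_data : String), Dom_hex_to_bits hex_data → Pre_hex_to_bits hex_data → Spec_hex_to_bits hex_data (hex_to_bits hex_data)

-- ===== LEMMAS AND PROOFS =====

-- the ascending list of set-bit positions of a natural number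
def setBits (m : Nat) : List Nat :=
  if h : m = 0 then []
  else (if m % 2 = 1 then [0] else []) ++ (setBits (m / 2)).map (· + 1)
termination_by m
decreasing_by exact Nat.div_lt_self (Nat.pos_of_ne_zero h) one_lt_two

theorem setBits_zero : setBits 0 = [] := by rw [setBits]; simp

theorem setBits_pos (m : Nat) (h : 0 < m) :
    setBits m = (if m % 2 = 1 then [0] else []) ++ (setBits (m / 2)).map (· + 1) := by
  rw [setBits]; simp [Nat.pos_iff_ne_zero.mp h]

theorem setBits_even (m : Nat) (h : m % 2 = 0) :
    setBits m = (setBits (m / 2)).map (· + 1) := by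
  rcases Nat.eq_zero_or_pos m with h0 | h0
  · subst h0; simp [setBits_zero]
  · rw [setBits_pos m h0]; simp [h]

-- Nat bit facts --------------------------------------------------------------

theorem and_pred_odd (m : Nat) (h : m % 2 = 1) : m &&& (m - 1) = m - 1 := by
  apply Nat.eq_of_testBit_eq
  intro i
  cases i with
  | zero =>
      rw [Nat.testBit_and]
      simp only [Nat.testBit_zero]
      simp [h]
  | succ i =>
      rw [Nat.testBit_and]
      simp only [Nat.testBit_succ]
      have hd : m / 2 = (m - 1) / 2 := by omega
      rw [hd, Bool.and_self]

theorem and_pred_even (k : Nat) (h : 0 < k) :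
    (2 * k) &&& (2 * k - 1) = 2 * (k &&& (k - 1)) := by
  apply Nat.eq_of_testBit_eq
  intro i
  cases i with
  | zero =>
      rw [Nat.testBit_and]
      simp only [Nat.testBit_zero]
      have e1 : 2 * k % 2 = 0 := by omega
      have e2 : 2 * (k &&& (k - 1)) % 2 = 0 := by omega
      simp [e1, e2]
  | succ i =>
      rw [Nat.testBit_and]
      simp only [Nat.testBit_succ]
      have h1 : 2 * k / 2 = k := by omega
      have h2 : (2 * k - 1) / 2 = k - 1 := by omega
      have h3 : 2 * (k &&& (k - 1)) / 2 = k &&& (k - 1) := by omega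
      rw [h1, h2, h3, Nat.testBit_and]

-- PySem bit-length facts ----------------------------------------------------

theorem bitLength_pos (x : Nat) (h : 0 < x) : 0 < PySem.Int.bitLength (x : Int) := by
  rw [PySem.Int.bitLength_natCast h]; omega

theorem bitLength_double (x : Nat) (h : 0 < x) :
    PySem.Int.bitLength ((2 * x : Nat) : Int) = PySem.Int.bitLength (x : Int) + 1 := by
  rw [PySem.Int.bitLength_natCast (by omega : 0 < 2 * x)]
  congr 2
  omega

-- the lowest-set-bit recursion satisfied by setBits
theorem setBits_lsb (m : Nat) (h : 0 < m) :
    setBits m = (PySem.Int.bitLength ((m - (m &&& (m - 1)) : Nat) : Int) - 1) ::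
      setBits (m &&& (m - 1)) := by
  induction m using Nat.strong_induction_on with
  | _ m ih =>
    rcases Nat.even_or_odd m with he | ho
    · -- even: m = 2k
      obtain ⟨k, hk⟩ := he
      have hk2 : m = 2 * k := by omega
      subst hk2
      have hkpos : 0 < k := by omega
      have hand : 2 * k &&& (2 * k - 1) = 2 * (k &&& (k - 1)) := and_pred_even k hkpos
      have hle : k &&& (k - 1) ≤ k - 1 := Nat.and_le_right
      have hsub : 2 * k - (2 * k &&& (2 * k - 1)) = 2 * (k - (k &&& (k - 1))) := by
        rw [hand]; omega
      have hxpos : 0 < k - (k &&& (k - 1)) := by omega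
      rw [hsub, hand, bitLength_double _ hxpos,
          setBits_even (2 * k) (by omega), Nat.mul_div_cancel_left _ (by omega : 0 < 2),
          ih k (by omega) hkpos, setBits_even (2 * (k &&& (k - 1))) (by omega),
          Nat.mul_div_cancel_left _ (by omega : 0 < 2)]
      have hbp : 0 < PySem.Int.bitLength ((k - (k &&& (k - 1)) : Nat) : Int) :=
        bitLength_pos _ hxpos
      simp only [List.map_cons]
      congr 1
      omega
    · -- odd
      have hmod : m % 2 = 1 := Nat.odd_iff.mp ho
      have hand : m &&& (m - 1) = m - 1 := and_pred_odd m hmod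
      have hsub : m - (m &&& (m - 1)) = 1 := by omega
      rw [hsub, hand, setBits_pos m h, setBits_even (m - 1) (by omega)]
      have hdiv : (m - 1) / 2 = m / 2 := by omega
      rw [hdiv, if_pos hmod]
      have h1 : (PySem.Int.bitLength ((1 : Nat) : Int) - 1) = 0 := by decide
      rw [h1]
      rfl

-- the B loop, on a nonnegative input, is setBits
theorem hexBitsLoop_natCast (m : Nat) :
    hexBitsLoop (m : Int) = (setBits m).map Int.ofNat := by
  induction m using Nat.strong_induction_on with
  | _ m ih =>
    rcases Nat.eq_zero_or_pos m with h0 | h0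
    · subst h0; rw [hexBitsLoop]; simp [setBits_zero]
    · rw [hexBitsLoop, dif_pos (by exact_mod_cast h0)]
      have hpred : (m : Int) - 1 = ((m - 1 : Nat) : Int) := by omega
      have hband : PySem.Int.band (m : Int) ((m : Int) - 1) = ((m &&& (m - 1) : Nat) : Int) := by
        rw [hpred, PySem.Int.band_natCast]
      have hneg : PySem.Int.band (m : Int) (-(m : Int))
          = ((m - (m &&& (m - 1)) : Nat) : Int) := by
        unfold PySem.Int.band
        rw [if_pos (by exact_mod_cast Nat.zero_le m), if_neg (by omega)]
        have h1 : (-(-(m : Int)) - 1).toNat = m - 1 := by omega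
        have h2 : (m : Int).toNat = m := by omega
        rw [h1, h2]
      have hlt : m &&& (m - 1) < m :=
        lt_of_le_of_lt Nat.and_le_right (by omega : m - 1 < m)
      rw [hband, hneg, ih _ hlt, setBits_lsb m h0]
      have hbl : 0 < PySem.Int.bitLength ((m - (m &&& (m - 1)) : Nat) : Int) := by
        apply bitLength_pos
        have := Nat.and_le_right (n := m) (m := m - 1)
        omega
      rw [List.map_cons]
      congr 1
      simp only [Int.ofNat_eq_natCast]
      omega

-- characterisation of Nat.toDigits 2 ----------------------------------------

theorem toDigitsCore_two (f : Nat) : ∀ (n : Nat) (acc : List Char), n < f →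
    Nat.toDigitsCore 2 f n acc =
      (if n = 0 then ['0'] else ((Nat.digits 2 n).map Nat.digitChar).reverse) ++ acc := by
  induction f with
  | zero => intro n acc h; omega
  | succ f ih =>
    intro n acc h
    rw [Nat.toDigitsCore]
    rcases Nat.lt_or_ge n 2 with h2 | h2
    · interval_cases n
      · rfl
      · rw [Nat.digits_def' (by norm_num : 1 < 2) (by norm_num : 0 < 1)]
        rfl
    · have hdiv : n / 2 ≠ 0 := by omega
      rw [if_neg hdiv, ih (n / 2) _ (by omega), if_neg hdiv,
          Nat.digits_def' (by norm_num : 1 < 2) (by omega : 0 < n)]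
      rw [if_neg (by omega : ¬ n = 0)]
      simp

theorem toDigits_two (n : Nat) :
    Nat.toDigits 2 n = (if n = 0 then ['0'] else ((Nat.digits 2 n).map Nat.digitChar).reverse) := by
  rw [Nat.toDigits, toDigitsCore_two (n + 1) n [] (by omega)]
  simp

theorem toDigits_two_chars (n : Nat) : ∀ c ∈ Nat.toDigits 2 n, c = '0' ∨ c = '1' := by
  intro c hc
  rw [toDigits_two] at hc
  split at hc
  · simp at hc; left; exact hc
  · simp only [List.mem_reverse, List.mem_map] at hc
    obtain ⟨d, hd, rfl⟩ := hc
    have := Nat.digits_lt_base (by norm_num) hd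
    interval_cases d
    · left; rfl
    · right; rfl

theorem toDigits_two_ne_nil (n : Nat) : Nat.toDigits 2 n ≠ [] := by
  rw [toDigits_two]
  split
  · simp
  · simp only [ne_eq, List.reverse_eq_nil_iff, List.map_eq_nil_iff]
    exact Nat.digits_ne_nil_iff_ne_zero.mpr (by assumption)

-- positions of '1' characters -----------------------------------------------

def onesIdx : List Char → List Nat
  | [] => []
  | c :: cs => (if c = '1' then [0] else []) ++ (onesIdx cs).map (· + 1)

theorem range_filter_eq_onesIdx (E : List Char) :
    (List.range E.length).filter (fun j => decide (E[j]? = some '1')) = onesIdx E := by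
  induction E with
  | nil => simp [onesIdx]
  | cons c cs ih =>
    rw [List.length_cons, List.range_succ_eq_map, onesIdx]
    simp only [List.filter_cons, List.filter_map, List.getElem?_cons_zero]
    have hshift : (List.range cs.length).filter
        ((fun j => decide ((c :: cs)[j]? = some '1')) ∘ Nat.succ)
        = (List.range cs.length).filter (fun j => decide (cs[j]? = some '1')) := by
      apply List.filter_congr
      intro j _
      simp [Function.comp]
    rw [hshift, ih]
    by_cases hc : c = '1' <;> simp [hc]

theorem onesIdx_append_zeros (xs : List Char) (k : Nat) :
    onesIdx (xs ++ List.replicate k '0') = onesIdx xs := by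
  induction xs with
  | nil =>
    simp only [List.nil_append]
    induction k with
    | zero => rfl
    | succ k ihk => simp [List.replicate_succ, onesIdx, ihk]
  | cons c cs ih => simp [onesIdx, ih]

theorem onesIdx_digits (m : Nat) :
    onesIdx ((Nat.digits 2 m).map Nat.digitChar) = setBits m := by
  induction m using Nat.strong_induction_on with
  | _ m ih =>
    rcases Nat.eq_zero_or_pos m with h0 | h0
    · subst h0; simp [onesIdx, setBits_zero]
    · rw [Nat.digits_def' (by norm_num : 1 < 2) h0, List.map_cons, onesIdx,
          ih (m / 2) (Nat.div_lt_self h0 one_lt_two), setBits_pos m h0]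
      congr 1
      have h01 : m % 2 = 0 ∨ m % 2 = 1 := by omega
      rcases h01 with h | h <;> rw [h] <;> decide

theorem onesIdx_revDigits (m : Nat) :
    onesIdx ((Nat.toDigits 2 m).reverse) = setBits m := by
  rw [toDigits_two]
  rcases Nat.eq_zero_or_pos m with h0 | h0
  · subst h0; simp [setBits_zero, onesIdx]
  · rw [if_neg (by omega)]
    rw [List.reverse_reverse]
    exact onesIdx_digits m

-- joining with commas --------------------------------------------------------

theorem flatMap_comma_dropLast {α : Type} (f : α → List Char) :
    ∀ (l : List α), (l.flatMap (fun x => f x ++ [','])).dropLast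
      = List.intercalate [','] (l.map f) := by
  intro l
  induction l with
  | nil => simp [List.intercalate]
  | cons a t ih =>
    cases t with
    | nil => simp [List.intercalate]
    | cons b t' =>
      have hne : (b :: t').flatMap (fun x => f x ++ [',']) ≠ [] := by
        simp [List.flatMap_cons]
      rw [List.flatMap_cons, List.dropLast_append_of_ne_nil hne, ih]
      have hj := PySem.Chars.join_cons_cons [','] (f a) (f b) (t'.map f)
      simp only [PySem.Chars.join] at hj
      simp only [List.map_cons]
      rw [hj]

-- zfill on an unsigned digit string ------------------------------------------

theorem zfill_digits (cs : List Char) (hne : cs ≠ [])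
    (hh : ∀ c ∈ cs, c = '0' ∨ c = '1') :
    PySem.Chars.zfill cs 8 = List.replicate (8 - cs.length) '0' ++ cs := by
  unfold PySem.Chars.zfill
  by_cases hlen : (8 : Int) ≤ (cs.length : Int)
  · rw [if_pos hlen]
    have : 8 - cs.length = 0 := by omega
    rw [this]; rfl
  · rw [if_neg hlen]
    cases cs with
    | nil => exact absurd rfl hne
    | cons c rest =>
      have hc := hh c (List.mem_cons_self)
      show (if c = '+' ∨ c = '-'
            then c :: (List.replicate ((8:Int).toNat - (c :: rest).length) '0' ++ rest)
            else List.replicate ((8:Int).toNat - (c :: rest).length) '0' ++ c :: rest)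
          = List.replicate (8 - (c :: rest).length) '0' ++ c :: rest
      rw [if_neg (by rcases hc with h | h <;> subst h <;> simp)]
      rfl

-- the whole pipeline, on a string parsing to a nonnegative value ------------

theorem binChars_nonneg (m : Nat) :
    PySem.Int.toBinChars0b (m : Int) = '0' :: 'b' :: Nat.toDigits 2 m := by
  unfold PySem.Int.toBinChars0b
  rw [if_neg (by omega)]
  simp

-- the little-endian digit array bin(n)[2:].zfill(8)[::-1] of a nonnegative value
theorem index_arr_eq (m : Nat) :
    (PySem.Chars.slice? (PySem.Chars.zfill
        (PySem.Chars.slice (PySem.Int.toBinChars0b (m : Int)) (some 2) none) 8)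
        none none (-1)).getD []
      = (Nat.toDigits 2 m).reverse ++ List.replicate (8 - (Nat.toDigits 2 m).length) '0' := by
  rw [binChars_nonneg]
  have hs : PySem.Chars.slice ('0' :: 'b' :: Nat.toDigits 2 m) (some 2) none
      = Nat.toDigits 2 m := by
    simp only [PySem.Chars.slice_eq_listSlice]
    rw [PySem.List.slice_from _ (by omega : (0:Int) ≤ 2)]
    rfl
  rw [hs, zfill_digits _ (toDigits_two_ne_nil m) (toDigits_two_chars m)]
  simp only [PySem.Chars.slice?_eq_listSlice?]
  rw [PySem.List.slice?_none_none_neg_one]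
  simp [List.reverse_append]

-- A's loop output: comma-terminated indices of the '1' characters
theorem cores_eq (E : List Char) :
    (PySem.List.pyRange 0 (E.length : Int) 1).foldl
        (fun cores i =>
          if PySem.Chars.pyGet? E i = some '1'
          then cores ++ (PySem.Int.toChars i ++ [',']) else cores) []
      = (onesIdx E).flatMap (fun j => PySem.Int.toChars (Int.ofNat j) ++ [',']) := by
  rw [PySem.List.foldl_ite_eq_foldl_filter
        (p := fun i => PySem.Chars.pyGet? E i = some '1')
        (f := fun cores i => cores ++ (PySem.Int.toChars i ++ [','])),
      PySem.List.foldl_append_eq_flatMap, PySem.List.pyRange_zero_natCast,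
      List.filter_map]
  have hp : (List.range E.length).filter
        ((fun i => decide (PySem.Chars.pyGet? E i = some '1')) ∘ (fun k : Nat => (k : Int)))
      = (List.range E.length).filter (fun j => decide (E[j]? = some '1')) := by
    apply List.filter_congr
    intro j _
    simp [Function.comp, PySem.Chars.pyGet?_eq_listPyGet?, PySem.List.pyGet?_natCast]
  rw [hp, range_filter_eq_onesIdx, List.nil_append, List.flatMap_map]
  rfl

theorem A_eq_B_of_parse (s : String) (m : Nat)
    (h : PySem.Int.ofStrBase? s 16 = some (m : Int)) :
    hex_to_bits s = hex_to_bits_alt s := by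
  unfold hex_to_bits hex_to_bits_alt
  rw [h]
  show String.ofList _ = String.ofList _
  apply congrArg
  rw [index_arr_eq]
  have hlen : (PySem.Chars.len ((Nat.toDigits 2 m).reverse
      ++ List.replicate (8 - (Nat.toDigits 2 m).length) '0') : Int)
      = (((Nat.toDigits 2 m).reverse
      ++ List.replicate (8 - (Nat.toDigits 2 m).length) '0').length : Int) := by
    rw [PySem.Chars.len_eq]
  rw [hlen, cores_eq, onesIdx_append_zeros, onesIdx_revDigits]
  simp only [PySem.Chars.slice_eq_listSlice]
  rw [PySem.List.slice_to_neg_one, flatMap_comma_dropLast, hexBitsLoop_natCast,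
      List.map_map, PySem.Chars.join]
  rfl

-- ===== VERDICT (by name: the statement is the Claim_ definition above) =====
theorem hex_to_bits_spec : Claim_equal_hex_to_bits := by
  intro hex_data _ hpre
  unfold Spec_hex_to_bits
  unfold Pre_hex_to_bits at hpre
  cases h : PySem.Int.ofStrBase? hex_data 16 with
  | none => rw [h] at hpre; simp at hpre
  | some n =>
      rw [h] at hpre
      simp only [Option.getD_some] at hpre
      have hm : n = ((n.toNat : Nat) : Int) := by omega
      exact A_eq_B_of_parse hex_data n.toNat (hm ▸ h)
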